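-- pv_equiv track=rewrite | github.com/RAINet-Lab/AML_TSF | utils.py | get_close_idxs
-- ===== SOURCE A (Python) =====
-- def get_close_idxs(indice, prev_size, prev_indices, j, sign):
--     if j<0:
--         return []
--     elif j>=prev_size:
--         return []
--     elif abs(indice-prev_indices[j]) < 70 :
--         return [prev_indices[j]] + get_close_idxs(indice, prev_size, prev_indices, j+sign, sign)
--     else:
--         return []
-- ===== SOURCE B (Python) =====
-- def get_close_idxs(indice, prev_size, prev_indices, j, sign):
--     n = 0
--     while 0 <= j + n * sign < prev_size and abs(indice - prev_indices[j + n * sign]) < 70: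
--         n += 1
--     return [prev_indices[j + t * sign] for t in range(n)]
-- ===== Notes on version B (the rewrite author's own statement) =====
-- stated objective: alternative
-- what changed: Replaces A's cons-building recursion with a two-phase algorithm: a counting loop first determines the run length n of consecutive in-range close positions, then the result is rebuilt by a comprehension over range(n).
-- outside the precondition, e.g. on get_close_idxs(0, 10, [10, 200], 0, 1): A returns [10], B returns [10]
import Mathlib
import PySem

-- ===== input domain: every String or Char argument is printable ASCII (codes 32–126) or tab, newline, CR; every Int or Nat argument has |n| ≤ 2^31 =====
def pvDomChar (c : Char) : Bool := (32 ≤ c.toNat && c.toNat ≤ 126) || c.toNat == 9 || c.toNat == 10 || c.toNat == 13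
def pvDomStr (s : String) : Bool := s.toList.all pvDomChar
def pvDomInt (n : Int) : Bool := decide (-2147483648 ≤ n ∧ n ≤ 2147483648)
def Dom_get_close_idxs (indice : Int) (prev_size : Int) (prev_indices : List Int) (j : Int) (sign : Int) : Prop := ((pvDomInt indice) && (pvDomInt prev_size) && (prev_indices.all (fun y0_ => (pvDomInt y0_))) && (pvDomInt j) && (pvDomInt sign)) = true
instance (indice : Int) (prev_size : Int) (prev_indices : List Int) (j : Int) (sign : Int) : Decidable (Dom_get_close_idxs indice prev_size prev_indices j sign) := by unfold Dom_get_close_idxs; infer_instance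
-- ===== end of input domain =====

-- B replaces A's cons-building recursion by a two-phase algorithm: count the run length, then rebuild by a comprehension (alternative; same cost).

-- ===== PORT A =====
-- Literal port of A's recursion; fuel := prev_indices.length + 1 only makes the recursion total
-- (inside Pre_ the walk ends within that many steps, so fuel never runs out there).
def pvGciA (fuel : Nat) (indice : Int) (prev_size : Int) (prev_indices : List Int) (j : Int) (sign : Int) : List Int :=
  match fuel with
  | 0 => []
  | fuel + 1 =>
    if j < 0 then []
    else if j ≥ prev_size then []
    else
      match PySem.List.pyGet? prev_indices j with
      | none => []   -- IndexError in Python; excluded by Pre_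
      | some v =>
        if (indice - v).natAbs < 70 then
          [v] ++ pvGciA fuel indice prev_size prev_indices (j + sign) sign
        else []

def get_close_idxs (indice : Int) (prev_size : Int) (prev_indices : List Int) (j : Int) (sign : Int) : List Int :=
  pvGciA (prev_indices.length + 1) indice prev_size prev_indices j sign

-- ===== PORT B =====
-- Literal port of Source B's counting while-loop (same fuel for totality): n counts consecutive
-- in-range close positions j + n*sign.
def pvGciCount (fuel : Nat) (indice : Int) (prev_size : Int) (prev_indices : List Int) (j : Int) (sign : Int) (n : Nat) : Nat :=
  match fuel with
  | 0 => n
  | fuel + 1 =>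
    if 0 ≤ j + (n : Int) * sign ∧ j + (n : Int) * sign < prev_size then
      match PySem.List.pyGet? prev_indices (j + (n : Int) * sign) with
      | none => n   -- IndexError in Python; excluded by Pre_
      | some v => if (indice - v).natAbs < 70 then pvGciCount fuel indice prev_size prev_indices j sign (n + 1) else n
    else n

-- the comprehension [prev_indices[j + t*sign] for t in range(n)]; every t < n was checked
-- in range by the counting loop, so .getD 0 is exact there (and Pre_ excludes the IndexError cases).
def get_close_idxs_alt (indice : Int) (prev_size : Int) (prev_indices : List Int) (j : Int) (sign : Int) : List Int :=
  (List.range (pvGciCount (prev_indices.length + 1) indice prev_size prev_indices j sign 0)).map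
    (fun (t : Nat) => (PySem.List.pyGet? prev_indices (j + (t : Int) * sign)).getD 0)

-- ===== PRECONDITION & SPEC =====
-- Pre_ excludes inputs where A's walk would run past the end of prev_indices (prev_size > len(prev_indices): IndexError)
-- or never advance (sign = 0: infinite recursion), except those where A stops at the very first step and returns [];
-- on some excluded inputs A still returns (the walk stops before reaching a missing index) and B agrees there.
def Pre_get_close_idxs (indice : Int) (prev_size : Int) (prev_indices : List Int) (j : Int) (sign : Int) : Prop :=
  (j < 0 ∨ prev_size ≤ j ∨ (j < (prev_indices.length : Int) ∧ 70 ≤ (indice - prev_indices.getD j.toNat 0).natAbs))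
  ∨ (sign ≠ 0 ∧ prev_size ≤ (prev_indices.length : Int))
instance (indice : Int) (prev_size : Int) (prev_indices : List Int) (j : Int) (sign : Int) : Decidable (Pre_get_close_idxs indice prev_size prev_indices j sign) := by unfold Pre_get_close_idxs; infer_instance

def pvWitness_get_close_idxs : Int × Int × List Int × Int × Int := (100, 3, [90, 120, 200], 0, 1)

def Spec_get_close_idxs (indice : Int) (prev_size : Int) (prev_indices : List Int) (j : Int) (sign : Int) (out : List Int) : Prop := out = get_close_idxs_alt indice prev_size prev_indices j sign
instance (indice : Int) (prev_size : Int) (prev_indices : List Int) (j : Int) (sign : Int) (out : List Int) : Decidable (Spec_get_close_idxs indice prev_size prev_indices j sign out) := by unfold Spec_get_close_idxs; infer_instance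

-- ===== CLAIM (what is proved, stated in full; the proofs are below) =====
def Claim_equal_get_close_idxs : Prop := ∀ (indice : Int) (prev_size : Int) (prev_indices : List Int) (j : Int) (sign : Int), Dom_get_close_idxs indice prev_size prev_indices j sign → Pre_get_close_idxs indice prev_size prev_indices j sign → Spec_get_close_idxs indice prev_size prev_indices j sign (get_close_idxs indice prev_size prev_indices j sign)

-- ===== LEMMAS AND PROOFS =====
-- Shifting the counter by one is the same as advancing the start position by sign.
theorem pvGciCount_shift (fuel : Nat) (indice prev_size : Int) (prev_indices : List Int) :
    ∀ (j sign : Int) (n : Nat),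
      pvGciCount fuel indice prev_size prev_indices j sign (n + 1)
        = pvGciCount fuel indice prev_size prev_indices (j + sign) sign n + 1 := by
  induction fuel with
  | zero => intro j sign n; simp [pvGciCount]
  | succ f ih =>
    intro j sign n
    have hk : j + ((n : Int) + 1) * sign = (j + sign) + (n : Int) * sign := by ring
    simp only [pvGciCount, Nat.cast_add, Nat.cast_one, hk]
    split_ifs with h
    · cases hg : PySem.List.pyGet? prev_indices ((j + sign) + (n : Int) * sign) with
      | none => simp
      | some v =>
        by_cases hlt : (indice - v).natAbs < 70
        · simp [hlt, ih]
        · simp [hlt]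
    · rfl

-- A's recursion equals the comprehension over the counted run length (same fuel).
theorem pvGciA_eq_map (fuel : Nat) (indice prev_size : Int) (prev_indices : List Int) :
    ∀ (j sign : Int),
      pvGciA fuel indice prev_size prev_indices j sign
        = (List.range (pvGciCount fuel indice prev_size prev_indices j sign 0)).map
            (fun (t : Nat) => (PySem.List.pyGet? prev_indices (j + (t : Int) * sign)).getD 0) := by
  induction fuel with
  | zero => intro j sign; simp [pvGciA, pvGciCount]
  | succ f ih =>
    intro j sign
    simp only [pvGciA, pvGciCount, Nat.cast_zero, zero_mul, add_zero, zero_add]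
    by_cases h0 : j < 0
    · have hc : ¬ (0 ≤ j ∧ j < prev_size) := by omega
      simp [h0, hc]
    · by_cases h1 : j < prev_size
      · have hc : 0 ≤ j ∧ j < prev_size := ⟨by omega, h1⟩
        simp only [if_neg h0, ge_iff_le, if_neg (not_le.mpr h1), if_pos hc]
        cases hg : PySem.List.pyGet? prev_indices j with
        | none => simp
        | some v =>
          by_cases hlt : (indice - v).natAbs < 70
          · simp only [hlt, if_true, pvGciCount_shift, List.range_succ_eq_map,
              List.map_cons, List.map_map, ih (j + sign) sign]
            rw [List.singleton_append]
            congr 1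
            · simp [hg]
            · apply List.map_congr_left
              intro t _
              simp only [Function.comp]
              congr 2
              push_cast
              ring
          · simp [hlt]
      · have hc : ¬ (0 ≤ j ∧ j < prev_size) := by omega
        simp [hc, h0, ge_iff_le, le_of_not_gt h1]

-- ===== VERDICT (by name: the statement is the Claim_ definition above) =====
theorem get_close_idxs_spec : Claim_equal_get_close_idxs := by
  intro indice prev_size prev_indices j sign _ _
  unfold Spec_get_close_idxs get_close_idxs get_close_idxs_alt
  exact pvGciA_eq_map _ _ _ _ _ _
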